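-- pv_equiv track=rewrite | github.com/peterbaudains/distance-metrics-in-st-clustering | tests/test_clusters_are_equivalent.py | get_cluster_label_remapper
-- ===== SOURCE A (Python) =====
-- def get_cluster_label_remapper(list_of_cluster_labels: list) -> dict:
--     cluster_remapper = {-1:-1}
--     max_cluster = 0
--     for c in list_of_cluster_labels:
--         if c not in cluster_remapper.keys():
--             cluster_remapper[c] = max_cluster + 1
--             max_cluster += 1
--     return cluster_remapper
-- ===== SOURCE B (Python) =====
-- def get_cluster_label_remapper(list_of_cluster_labels: list) -> dict:
--     # Record the first-occurrence index of every label other than -1,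
--     # then number the labels by sorting on that index (stable, so this
--     # reproduces first-appearance order) starting from 1.
--     first = {}
--     for i, c in enumerate(list_of_cluster_labels):
--         if c != -1:
--             first.setdefault(c, i)
--     remap = {-1: -1}
--     for rank, c in enumerate(sorted(first, key=first.get), start=1):
--         remap[c] = rank
--     return remap
-- ===== Notes on version B (the rewrite author's own statement) =====
-- stated objective: alternative
-- what changed: Instead of maintaining a running counter and assigning numbers while scanning, B records each non -1 label's first-occurrence index in one pass and then obtains the numbering by sorting the labels on that index and enumerating from 1 (correct because sorting by first index reproduces first-appearance order).
import Mathlib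
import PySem

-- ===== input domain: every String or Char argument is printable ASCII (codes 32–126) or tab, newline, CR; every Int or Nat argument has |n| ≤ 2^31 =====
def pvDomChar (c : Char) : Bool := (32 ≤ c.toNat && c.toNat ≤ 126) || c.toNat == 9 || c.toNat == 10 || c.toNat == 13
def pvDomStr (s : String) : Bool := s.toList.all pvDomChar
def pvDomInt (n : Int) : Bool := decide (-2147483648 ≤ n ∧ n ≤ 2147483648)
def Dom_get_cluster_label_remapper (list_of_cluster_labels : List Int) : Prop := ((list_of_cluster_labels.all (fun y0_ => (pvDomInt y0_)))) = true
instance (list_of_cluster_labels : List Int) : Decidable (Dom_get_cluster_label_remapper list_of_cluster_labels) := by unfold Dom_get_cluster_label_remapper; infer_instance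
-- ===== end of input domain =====

-- B replaces A's counter-maintaining scan by a first-occurrence-index map followed by a sort on that index (objective: alternative algorithm, same result).
-- ===== PORT A =====
-- literal port of A: dict {-1:-1}, counter max_cluster, one loop assigning max_cluster+1 to unseen labels
def get_cluster_label_remapper (list_of_cluster_labels : List Int) : List (Int × Int) :=
  let init : PySem.Dict Int Int := PySem.Dict.ofList [(-1, -1)]
  (list_of_cluster_labels.foldl
    (fun (st : PySem.Dict Int Int × Int) c =>
      if st.1.contains c then st
      else (st.1.insert c (st.2 + 1), st.2 + 1))
    (init, 0)).1.items

-- ===== PORT B =====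
-- literal port of B: first-occurrence indices via setdefault, then sort by index and enumerate from 1
def get_cluster_label_remapper_alt (list_of_cluster_labels : List Int) : List (Int × Int) :=
  let first := (PySem.List.enumerate list_of_cluster_labels 0).foldl
    (fun (d : PySem.Dict Int Int) p => if p.2 ≠ -1 then d.setdefault p.2 p.1 else d)
    PySem.Dict.empty
  let ordered := PySem.List.sorted first.keys (fun c => first.getD c 0) false
  let remap : PySem.Dict Int Int := PySem.Dict.ofList [(-1, -1)]
  ((PySem.List.enumerate ordered 1).foldl (fun d p => d.insert p.2 p.1) remap).items

-- ===== PRECONDITION & SPEC =====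
def Spec_get_cluster_label_remapper (list_of_cluster_labels : List Int) (out : List (Int × Int)) : Prop := out = get_cluster_label_remapper_alt list_of_cluster_labels
instance (list_of_cluster_labels : List Int) (out : List (Int × Int)) : Decidable (Spec_get_cluster_label_remapper list_of_cluster_labels out) := by unfold Spec_get_cluster_label_remapper; infer_instance

-- ===== CLAIM (what is proved, stated in full; the proofs are below) =====
def Claim_equal_get_cluster_label_remapper : Prop := ∀ (list_of_cluster_labels : List Int), Dom_get_cluster_label_remapper list_of_cluster_labels → Spec_get_cluster_label_remapper list_of_cluster_labels (get_cluster_label_remapper list_of_cluster_labels)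

-- ===== LEMMAS AND PROOFS =====

-- fresh labels in first-appearance order relative to an already-seen list, paired with m+1, m+2, …
def pvEmit (seen : List Int) (m : Int) (xs : List Int) : List (Int × Int) :=
  match xs with
  | [] => []
  | c :: rest => if c ∈ seen then pvEmit seen m rest
                 else (c, m + 1) :: pvEmit (seen ++ [c]) (m + 1) rest

-- the corresponding list of fresh labels alone
def pvK (seen : List Int) (xs : List Int) : List Int :=
  match xs with
  | [] => []
  | c :: rest => if c ∈ seen then pvK seen rest else c :: pvK (seen ++ [c]) rest

-- fresh non -1 labels paired with their first-occurrence index (B's `first` dict, relative to seen keys)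
def pvFirst (seen : List Int) (i : Int) (xs : List Int) : List (Int × Int) :=
  match xs with
  | [] => []
  | c :: rest => if c = -1 ∨ c ∈ seen then pvFirst seen (i + 1) rest
                 else (c, i) :: pvFirst (seen ++ [c]) (i + 1) rest

lemma pvEmit_eq_enumerate_pvK (xs : List Int) : ∀ (seen : List Int) (m : Int),
    pvEmit seen m xs = (PySem.List.enumerate (pvK seen xs) (m + 1)).map (fun p => (p.2, p.1)) := by
  induction xs with
  | nil => intro seen m; rfl
  | cons c rest ih =>
    intro cistseen m
    simp only [pvEmit, pvK]
    by_cases hc : c ∈ cistseen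
    · rw [if_pos hc, if_pos hc]; exact ih cistseen m
    · rw [if_neg hc, if_neg hc]
      simp only [PySem.List.enumerate_cons, List.map_cons]
      rw [ih (cistseen ++ [c]) (m + 1)]

-- A's loop appends exactly pvEmit of the fresh labels
lemma foldA_items (xs : List Int) : ∀ (d : PySem.Dict Int Int) (m : Int),
    (xs.foldl (fun (st : PySem.Dict Int Int × Int) c =>
        if st.1.contains c then st
        else (st.1.insert c (st.2 + 1), st.2 + 1)) (d, m)).1.items
      = d.items ++ pvEmit d.keys m xs := by
  induction xs with
  | nil => intro d m; simp [pvEmit]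
  | cons c rest ih =>
    intro d m
    simp only [List.foldl_cons, pvEmit]
    by_cases hc : d.contains c
    · rw [if_pos hc, if_pos ((PySem.Dict.contains_iff_mem_keys _ _).mp hc)]
      exact ih d m
    · rw [if_neg hc, if_neg (fun hm => hc ((PySem.Dict.contains_iff_mem_keys _ _).mpr hm))]
      rw [ih (d.insert c (m + 1)) (m + 1)]
      rw [PySem.Dict.items_insert_of_not_contains _ _ (by simpa using hc)]
      rw [PySem.Dict.keys_insert_of_not_contains _ _ (by simpa using hc)]
      simp

-- B's first loop appends exactly pvFirst of the fresh non -1 labels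
lemma foldB_first_items (xs : List Int) : ∀ (d : PySem.Dict Int Int) (i : Int),
    ((PySem.List.enumerate xs i).foldl
        (fun (d : PySem.Dict Int Int) p => if p.2 ≠ -1 then d.setdefault p.2 p.1 else d) d).items
      = d.items ++ pvFirst d.keys i xs := by
  induction xs with
  | nil => intro d i; simp [PySem.List.enumerate_nil, pvFirst]
  | cons c rest ih =>
    intro d i
    simp only [PySem.List.enumerate_cons, List.foldl_cons, pvFirst]
    by_cases h1 : c = -1
    · rw [if_neg (by simp [h1]), if_pos (Or.inl h1)]
      exact ih d (i + 1)
    · rw [if_pos (by simpa using h1)]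
      by_cases hc : d.contains c
      · rw [PySem.Dict.setdefault_of_contains _ _ hc,
            if_pos (Or.inr ((PySem.Dict.contains_iff_mem_keys _ _).mp hc))]
        exact ih d (i + 1)
      · rw [PySem.Dict.setdefault_of_not_contains _ _ (by simpa using hc),
            if_neg (by
              rintro (h | h)
              · exact h1 h
              · exact absurd ((PySem.Dict.contains_iff_mem_keys _ _).mpr h) hc)]
        rw [ih (d.insert c i) (i + 1)]
        rw [PySem.Dict.items_insert_of_not_contains _ _ (by simpa using hc)]
        rw [PySem.Dict.keys_insert_of_not_contains _ _ (by simpa using hc)]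
        simp

-- the keys of pvFirst are pvK with -1 prepended to the seen list
lemma pvFirst_map_fst (xs : List Int) : ∀ (seen : List Int) (i : Int),
    (pvFirst seen i xs).map Prod.fst = pvK (-1 :: seen) xs := by
  induction xs with
  | nil => intro seen i; rfl
  | cons c rest ih =>
    intro seen i
    simp only [pvFirst, pvK, List.mem_cons]
    by_cases h : c = -1 ∨ c ∈ seen
    · rw [if_pos h, if_pos h]; exact ih seen (i + 1)
    · rw [if_neg h, if_neg h]
      simp only [List.map_cons]
      rw [ih (seen ++ [c]) (i + 1)]
      congr 1

-- every index stored by pvFirst is ≥ the starting index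
lemma pvFirst_snd_ge (xs : List Int) : ∀ (seen : List Int) (i : Int) (p : Int × Int),
    p ∈ pvFirst seen i xs → i ≤ p.2 := by
  induction xs with
  | nil => intro seen i p h; simp [pvFirst] at h
  | cons c rest ih =>
    intro seen i p h
    simp only [pvFirst] at h
    by_cases hc : c = -1 ∨ c ∈ seen
    · rw [if_pos hc] at h; have := ih seen (i + 1) p h; omega
    · rw [if_neg hc] at h
      rcases List.mem_cons.mp h with h | h
      · subst h; omega
      · have := ih (seen ++ [c]) (i + 1) p h; omega

-- the stored indices are strictly increasing along pvFirst
lemma pvFirst_pairwise (xs : List Int) : ∀ (seen : List Int) (i : Int),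
    (pvFirst seen i xs).Pairwise (fun p q => p.2 < q.2) := by
  induction xs with
  | nil => intro seen i; simp [pvFirst]
  | cons c rest ih =>
    intro seen i
    simp only [pvFirst]
    by_cases hc : c = -1 ∨ c ∈ seen
    · rw [if_pos hc]; exact ih seen (i + 1)
    · rw [if_neg hc]
      refine List.pairwise_cons.mpr ⟨?_, ih (seen ++ [c]) (i + 1)⟩
      intro q hq
      have := pvFirst_snd_ge rest (seen ++ [c]) (i + 1) q hq
      omega

-- pvK is fresh w.r.t. seen and has no duplicates
lemma pvK_nodup_and_fresh (xs : List Int) : ∀ (seen : List Int),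
    (pvK seen xs).Nodup ∧ ∀ c ∈ pvK seen xs, c ∉ seen := by
  induction xs with
  | nil => intro seen; simp [pvK]
  | cons c rest ih =>
    intro seen
    simp only [pvK]
    by_cases hc : c ∈ seen
    · rw [if_pos hc]; exact ih seen
    · rw [if_neg hc]
      obtain ⟨hnd, hfr⟩ := ih (seen ++ [c])
      refine ⟨List.nodup_cons.mpr ⟨fun hm => ?_, hnd⟩, ?_⟩
      · exact (hfr c hm) (by simp)
      · intro x hx
        rcases List.mem_cons.mp hx with h | h
        · subst h; exact hc
        · intro hxs; exact (hfr x h) (by simp [hxs])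

-- ===== VERDICT (by name: the statement is the Claim_ definition above) =====
theorem get_cluster_label_remapper_spec : Claim_equal_get_cluster_label_remapper := by
  intro xs _
  unfold Spec_get_cluster_label_remapper
  unfold get_cluster_label_remapper get_cluster_label_remapper_alt
  simp only
  rw [foldA_items]
  -- name B's first dict
  set first := (PySem.List.enumerate xs 0).foldl
    (fun (d : PySem.Dict Int Int) p => if p.2 ≠ -1 then d.setdefault p.2 p.1 else d)
    PySem.Dict.empty with hfirst
  have hitems : first.items = pvFirst [] 0 xs := by
    rw [hfirst, foldB_first_items]; simp [PySem.Dict.empty]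
  have hkeys : first.keys = pvK [-1] xs := by
    show first.items.map Prod.fst = _
    rw [hitems, pvFirst_map_fst]
  have hndk : first.keys.Nodup := by
    rw [hkeys]; exact (pvK_nodup_and_fresh xs [-1]).1
  -- the keys are already sorted by stored index
  have hsorted : PySem.List.sorted first.keys (fun c => first.getD c 0) false = first.keys := by
    refine PySem.List.sorted_eq_of_perm_of_pairwise_lt _ _ _ (List.Perm.refl _) ?_
    show (first.items.map Prod.fst).Pairwise _
    rw [List.pairwise_map]
    have hpw : first.items.Pairwise (fun p q => p.2 < q.2) := by
      rw [hitems]; exact pvFirst_pairwise xs [] 0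
    refine List.Pairwise.imp_of_mem ?_ hpw
    intro p q hp hq hlt
    have h1 : first.getD p.1 0 = p.2 := PySem.Dict.getD_of_mem_items first (by simpa using hp) hndk 0
    have h2 : first.getD q.1 0 = q.2 := PySem.Dict.getD_of_mem_items first (by simpa using hq) hndk 0
    simpa [h1, h2] using hlt
  rw [hsorted, hkeys]
  -- final numbering fold appends fresh pairs
  rw [PySem.Dict.items_foldl_insert_fresh _ _ _ _ ?hfresh ?hnodup]
  case hfresh =>
    intro a ha
    have h2 : a.2 ∈ pvK [-1] xs := by
      have hmap := PySem.List.map_snd_enumerate (pvK [-1] xs) 1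
      rw [← hmap]
      exact List.mem_map.mpr ⟨a, ha, rfl⟩
    have hne : a.2 ≠ -1 := by
      intro h
      exact ((pvK_nodup_and_fresh xs [-1]).2 a.2 h2) (by simp [h])
    simp [PySem.Dict.ofList, PySem.Dict.update, PySem.Dict.contains_insert, hne]
  case hnodup =>
    rw [PySem.List.map_snd_enumerate]
    exact (pvK_nodup_and_fresh xs [-1]).1
  have hk : (PySem.Dict.ofList [((-1 : Int), (-1 : Int))]).keys = [-1] := by decide
  rw [hk, pvEmit_eq_enumerate_pvK]
  norm_num
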